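-- pv_equiv track=rewrite | github.com/DSW41923/cryptopals_DSW41923 | Set 1/04.py | evaluate_palintext
-- ===== SOURCE A (Python) =====
-- import string
--
-- def evaluate_palintext(plaintext):
--     point = 0
--     for byte in plaintext:
--         # import pdb; pdb.set_trace()
--         if byte >= 128:
--             return -1
--
--         char = byte.to_bytes(1, 'big').decode()
--
--         if char in string.printable:
--             point += 1
--
--         if char in string.ascii_letters:
--             point += 1
--
--         if char == ' ':
--             point += 1
--
--     return point
-- ===== SOURCE B (Python) =====
-- import string
--
--
-- def evaluate_palintext(plaintext):
--     # validation pass: any high byte dominates everything with -1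
--     if any(byte >= 128 for byte in plaintext):
--         return -1
--     # frequency table over distinct byte values, then score each key once
--     counts = {}
--     for byte in plaintext:
--         counts[byte] = counts.get(byte, 0) + 1
--     total = 0
--     for byte, cnt in counts.items():
--         char = byte.to_bytes(1, 'big').decode()
--         weight = (char in string.printable) + (char in string.ascii_letters) + (char == ' ')
--         total += weight * cnt
--     return total
-- ===== Notes on version B (the rewrite author's own statement) =====
-- stated objective: idiomatic
-- what changed: A's single per-byte scan with three incremental ifs and an early return is replaced by a validation pass (any byte >= 128 gives -1) followed by a frequency table over distinct byte values, scoring each distinct byte once weighted by its count.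
import Mathlib
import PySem

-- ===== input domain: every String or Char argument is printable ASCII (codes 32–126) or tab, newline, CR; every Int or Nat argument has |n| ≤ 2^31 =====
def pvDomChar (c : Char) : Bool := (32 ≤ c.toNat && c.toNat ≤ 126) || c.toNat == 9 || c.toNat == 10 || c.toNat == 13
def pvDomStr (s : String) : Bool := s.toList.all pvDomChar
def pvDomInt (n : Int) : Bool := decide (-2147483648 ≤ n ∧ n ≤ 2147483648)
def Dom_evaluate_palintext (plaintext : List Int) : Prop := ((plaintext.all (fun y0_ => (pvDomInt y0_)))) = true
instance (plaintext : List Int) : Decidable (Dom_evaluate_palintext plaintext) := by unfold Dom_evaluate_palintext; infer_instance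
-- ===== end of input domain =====

-- B replaces A's per-byte early-return scan by a validation pass plus a frequency table
-- scored once per distinct byte value (objective: alternative/idiomatic; same return value).

-- ===== PORT A =====
-- char in string.printable / string.ascii_letters / ' ' as byte-code classes (exact for single chars 0..127)
def pyPrintable (b : Int) : Bool := (32 ≤ b && b ≤ 126) || (9 ≤ b && b ≤ 13)
def pyLetter (b : Int) : Bool := (65 ≤ b && b ≤ 90) || (97 ≤ b && b ≤ 122)

def evaluate_palintext_loop : List Int → Int → Int
  | [], point => point
  | byte :: rest, point =>
    if 128 ≤ byte then -1
    else
      -- byte.to_bytes(1,'big').decode() raises for byte < 0 (excluded by Pre_); the class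
      -- tests below read the byte code directly, exact on 0 ≤ byte ≤ 127
      let p1 := if pyPrintable byte then point + 1 else point
      let p2 := if pyLetter byte then p1 + 1 else p1
      let p3 := if byte = 32 then p2 + 1 else p2
      evaluate_palintext_loop rest p3

def evaluate_palintext (plaintext : List Int) : Int :=
  evaluate_palintext_loop plaintext 0

-- ===== PORT B =====
def pyWeight (b : Int) : Int :=
  (if pyPrintable b then 1 else 0) + (if pyLetter b then 1 else 0) + (if b = 32 then 1 else 0)

def evaluate_palintext_alt (plaintext : List Int) : Int :=
  if plaintext.any (fun byte => 128 ≤ byte) then -1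
  else
    let counts := plaintext.foldl (fun d byte => d.insert byte (d.getD byte 0 + 1)) PySem.Dict.empty
    counts.items.foldl (fun total p => total + pyWeight p.1 * p.2) 0

-- ===== PRECONDITION & SPEC =====
-- Pre_ excludes exactly the inputs on which the Python A raises (OverflowError in
-- int.to_bytes): a negative byte occurring before any byte ≥ 128.
def Pre_evaluate_palintext (plaintext : List Int) : Prop :=
  ∀ x ∈ plaintext.takeWhile (fun b => decide (b < 128)), 0 ≤ x
instance (plaintext : List Int) : Decidable (Pre_evaluate_palintext plaintext) := by
  unfold Pre_evaluate_palintext; infer_instance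

def pvWitness_evaluate_palintext : List Int := [72, 105, 32]

def Spec_evaluate_palintext (plaintext : List Int) (out : Int) : Prop := out = evaluate_palintext_alt plaintext
instance (plaintext : List Int) (out : Int) : Decidable (Spec_evaluate_palintext plaintext out) := by unfold Spec_evaluate_palintext; infer_instance

-- ===== CLAIM (what is proved, stated in full; the proofs are below) =====
def Claim_equal_evaluate_palintext : Prop := ∀ (plaintext : List Int), Dom_evaluate_palintext plaintext → Pre_evaluate_palintext plaintext → Spec_evaluate_palintext plaintext (evaluate_palintext plaintext)

-- ===== LEMMAS AND PROOFS =====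

lemma loop_high (xs : List Int) (p : Int) (h : ∃ x ∈ xs, 128 ≤ x) :
    evaluate_palintext_loop xs p = -1 := by
  induction xs generalizing p with
  | nil => simp at h
  | cons b rest ih =>
    obtain ⟨x, hx, hge⟩ := h
    by_cases hb : 128 ≤ b
    · simp [evaluate_palintext_loop, hb]
    · rcases List.mem_cons.mp hx with rfl | hx
      · omega
      · simp only [evaluate_palintext_loop, if_neg hb]
        exact ih _ ⟨x, hx, hge⟩

lemma loop_low (xs : List Int) (p : Int) (h : ∀ x ∈ xs, x < 128) :
    evaluate_palintext_loop xs p = p + (xs.map pyWeight).sum := by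
  induction xs generalizing p with
  | nil => simp [evaluate_palintext_loop]
  | cons b rest ih =>
    have hb : ¬ 128 ≤ b := by have := h b (by simp); omega
    simp only [evaluate_palintext_loop, if_neg hb, List.map_cons, List.sum_cons]
    rw [ih _ (fun x hx => h x (by simp [hx]))]
    unfold pyWeight
    split_ifs <;> ring

lemma sum_ite_single (l : List Int) (hnd : l.Nodup) (a : Int) (ha : a ∈ l) (f : Int → Int) :
    (l.map (fun k => if k = a then f k else 0)).sum = f a := by
  induction l with
  | nil => simp at ha
  | cons b rest ih =>
    obtain ⟨hnb, hndr⟩ := List.nodup_cons.mp hnd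
    by_cases hba : b = a
    · subst hba
      have hz : ∀ x ∈ rest.map (fun k => if k = b then f k else 0), x = 0 := by
        intro x hx
        obtain ⟨k, hk, rfl⟩ := List.mem_map.mp hx
        have hkb : k ≠ b := fun e => hnb (e ▸ hk)
        simp [hkb]
      simp [List.sum_eq_zero hz]
    · have ha' : a ∈ rest := by
        rcases List.mem_cons.mp ha with rfl | ha' <;> [exact absurd rfl hba; exact ha']
      simp [hba, ih hndr ha']

lemma sum_dedup_count (f : Int → Int) (l : List Int) :
    (l.dedup.map (fun k => f k * (l.count k : Int))).sum = (l.map f).sum := by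
  induction l with
  | nil => simp
  | cons a rest ih =>
    have hsplit : ∀ (m : List Int),
        (m.map (fun k => f k * ((a :: rest).count k : Int))).sum
          = (m.map (fun k => f k * (rest.count k : Int))).sum
            + (m.map (fun k => if k = a then f k else 0)).sum := by
      intro m
      have hfun : (fun k => f k * (((a :: rest).count k : Nat) : Int))
          = fun k => f k * ((rest.count k : Nat) : Int) + (if k = a then f k else 0) := by
        funext k
        rw [List.count_cons]
        push_cast
        by_cases hk : k = a
        · simp [hk]; ring
        · simp [hk]; exact Or.inl fun e => hk e.symm
      rw [hfun, PySem.List.sum_map_add_int]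
    by_cases ha : a ∈ rest
    · rw [List.dedup_cons_of_mem ha, hsplit, ih,
        sum_ite_single rest.dedup rest.nodup_dedup a (List.mem_dedup.mpr ha) f]
      simp [add_comm]
    · rw [List.dedup_cons_of_notMem ha]
      simp only [List.map_cons, List.sum_cons, hsplit]
      have hz : ∀ x ∈ rest.dedup.map (fun k => if k = a then f k else 0), x = 0 := by
        intro x hx
        obtain ⟨k, hk, rfl⟩ := List.mem_map.mp hx
        have hka : k ≠ a := fun e => ha (e ▸ List.mem_dedup.mp hk)
        simp [hka]
      rw [List.sum_eq_zero hz, ih]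
      have hc0 : rest.count a = 0 := List.count_eq_zero.mpr ha
      simp [hc0]

lemma alt_low (xs : List Int) (h : ∀ x ∈ xs, x < 128) :
    evaluate_palintext_alt xs = (xs.map pyWeight).sum := by
  have hany : xs.any (fun byte => decide (128 ≤ byte)) = false := by
    simp only [List.any_eq_false, decide_eq_true_eq]
    intro x hx; have := h x hx; omega
  unfold evaluate_palintext_alt
  rw [if_neg (by simp [hany])]
  show ((xs.foldl (fun d byte => d.insert byte (d.getD byte 0 + 1))
      PySem.Dict.empty).items.foldl (fun total p => total + pyWeight p.1 * p.2) 0)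
    = (xs.map pyWeight).sum
  rw [PySem.Dict.foldl_insert_getD_add_one_eq_counter, PySem.Dict.items_counter,
    PySem.List.foldl_add]
  simp only [List.map_map, Function.comp_def, zero_add]
  have hperm : (PySem.Set.ofList xs).Perm xs.dedup := by
    refine (List.perm_ext_iff_of_nodup (PySem.Set.nodup_ofList xs) xs.nodup_dedup).mpr ?_
    intro a; simp [PySem.Set.mem_ofList, List.mem_dedup]
  calc ((PySem.Set.ofList xs).map (fun k => pyWeight k * (xs.count k : Int))).sum
      = (xs.dedup.map (fun k => pyWeight k * (xs.count k : Int))).sum :=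
        (hperm.map _).sum_eq
    _ = (xs.map pyWeight).sum := sum_dedup_count pyWeight xs

-- ===== VERDICT (by name: the statement is the Claim_ definition above) =====
theorem evaluate_palintext_spec : Claim_equal_evaluate_palintext := by
  intro pt _ _
  unfold Spec_evaluate_palintext
  by_cases h : ∃ x ∈ pt, 128 ≤ x
  · rw [show evaluate_palintext pt = -1 from loop_high pt 0 h]
    unfold evaluate_palintext_alt
    rw [if_pos]
    simp only [List.any_eq_true, decide_eq_true_eq]
    exact h
  · push Not at h
    have h' : ∀ x ∈ pt, x < 128 := fun x hx => by have := h x hx; omega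
    rw [show evaluate_palintext pt = (pt.map pyWeight).sum from by
      simpa using loop_low pt 0 h', alt_low pt h']
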